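-- pv_equiv track=rewrite | github.com/italopaiva/cs-server | src/codeschool/sparta/models/groups.py | organize_groups
-- ===== SOURCE A (Python) =====
-- from itertools import cycle
--
-- def organize_groups(mapping, group_size):
--     """
--     Receives a mapping from users to grades and return a list of groups
--     with the approximate ``group_size``.
--
--     It tries to match users with the best grades with the users with the
--     worst grades.
--
--     Args:
--         mapping (map):
--             A dictionary from users to their respective grades.
--         group_size (int):
--             The desired group size.
--     Examples:
--
--         >>> users = {'john': 10, 'paul': 9, 'george': 8, 'ringo': 6}
--         >>> organize_groups(users, 2)
--         [{'john': 10,'ringo': 6}, {'paul': 8, 'george': 8}]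
--     """
--     users_quantity = len(mapping)
--
--     if group_size > users_quantity:
--         return [mapping.copy()]
--
--     n_groups = users_quantity // group_size
--     remaining_users = users_quantity % group_size
--
--     # Initialize possible groups as empty lists
--     groups = [{} for _ in range(n_groups)]
--
--     sorted_users = sorted(mapping.items(), key=lambda x: x[1])
--
--     for idx in cycle([0, -1]):
--         if len(sorted_users) < n_groups:
--             break
--
--         for i in range(n_groups):
--             name, grade = sorted_users.pop(idx)
--             groups[i][name] = grade
--
--     j = 0
--     for i, user in enumerate(sorted_users):
--         name = user[0]
--         grade = user[1]
--         if j == n_groups: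
--             j = 0
--         groups[j][name] = grade
--         j += 1
--     return groups
-- ===== SOURCE B (Python) =====
-- def _assign_front(groups, s, lo, count):
--     for i in range(count):
--         name, grade = s[lo + i]
--         groups[i][name] = grade
--
--
-- def organize_groups(mapping, group_size):
--     n = len(mapping)
--     if group_size > n:
--         return [dict(mapping)]
--     g = n // group_size
--     s = sorted(mapping.items(), key=lambda u: u[1])
--     rounds, rem = divmod(n, g)
--     groups = [{} for _ in range(g)]
--     lo, hi = 0, n
--     for k in range(rounds):
--         if k % 2 == 0:
--             _assign_front(groups, s, lo, g)
--             lo += g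
--         else:
--             for i in range(g):
--                 name, grade = s[hi - 1 - i]
--                 groups[i][name] = grade
--             hi -= g
--     _assign_front(groups, s, lo, rem)
--     return groups
-- ===== Notes on version B (the rewrite author's own statement) =====
-- stated objective: faster
-- what changed: B replaces A's destructive pop(0)/pop(-1) loop on a shrinking list (each pop(0) is O(n)) by two index pointers (lo/hi) over the fixed sorted list, with the round count and remainder computed once by divmod.
import Mathlib
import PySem

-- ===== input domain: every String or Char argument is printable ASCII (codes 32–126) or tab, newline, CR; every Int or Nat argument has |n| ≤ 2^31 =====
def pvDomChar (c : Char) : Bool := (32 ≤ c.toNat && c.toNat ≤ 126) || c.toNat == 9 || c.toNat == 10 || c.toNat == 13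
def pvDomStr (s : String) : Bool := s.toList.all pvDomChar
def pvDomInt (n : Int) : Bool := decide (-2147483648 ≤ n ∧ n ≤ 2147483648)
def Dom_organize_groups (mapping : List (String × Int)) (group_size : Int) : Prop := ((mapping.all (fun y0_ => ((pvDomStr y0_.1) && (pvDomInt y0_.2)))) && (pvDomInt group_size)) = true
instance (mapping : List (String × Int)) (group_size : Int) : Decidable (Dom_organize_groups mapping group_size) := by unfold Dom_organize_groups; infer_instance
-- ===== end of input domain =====

-- B replaces A's destructive pop(0)/pop(-1) loop on a shrinking list by two index pointers
-- (lo/hi) over the fixed sorted list, removing the O(n) cost of each pop(0); the equality of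
-- return values is proved below for every input with group_size >= 1 (Pre_).

-- ===== PORT A =====
-- inner 'for i in range(n_groups): name, grade = sorted_users.pop(idx); groups[i][name] = grade'
def ogInner : Nat → Int → List (String × Int) → List (PySem.Dict String Int) → Nat →
    List (String × Int) × List (PySem.Dict String Int)
  | 0, _, s, groups, _ => (s, groups)
  | k+1, idx, s, groups, i =>
    match PySem.List.pop? s idx with
    | none => (s, groups)            -- unreachable: here Python would raise IndexError
    | some ((nm, gr), s') => ogInner k idx s' (groups.modify i (fun d => d.insert nm gr)) (i+1)

-- 'for idx in cycle([0, -1]): if len(sorted_users) < n_groups: break; …'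
-- fuel makes the loop total; on Pre_ (group_size ≥ 1) it is never exhausted.
def ogOuter : Nat → Bool → Int → List (String × Int) → List (PySem.Dict String Int) →
    List (String × Int) × List (PySem.Dict String Int)
  | 0, _, _, s, groups => (s, groups)
  | fuel+1, front, nG, s, groups =>
    if (s.length : Int) < nG then (s, groups)
    else
      let r := ogInner nG.toNat (if front then 0 else -1) s groups 0
      ogOuter fuel (!front) nG r.1 r.2

-- trailing 'j' loop distributing the remaining users
def ogTail (nG : Int) : List (String × Int) → Int → List (PySem.Dict String Int) → List (PySem.Dict String Int)
  | [], _, groups => groups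
  | (nm, gr) :: rest, j, groups =>
    let j' := if j == nG then 0 else j
    ogTail nG rest (j' + 1) (groups.modify j'.toNat (fun d => d.insert nm gr))

def organize_groups (mapping : List (String × Int)) (group_size : Int) : List (List (String × Int)) :=
  let users_quantity : Int := mapping.length
  if group_size > users_quantity then [mapping]
  else
    let n_groups := PySem.Int.floordiv users_quantity group_size
    let groups : List (PySem.Dict String Int) := List.replicate n_groups.toNat PySem.Dict.empty
    let sorted_users := PySem.List.sorted mapping (fun x => x.2)
    let r := ogOuter (sorted_users.length + 1) true n_groups sorted_users groups
    (ogTail n_groups r.1 0 r.2).map PySem.Dict.items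

-- ===== PORT B =====
-- '_assign_front(groups, s, lo, count)': groups[i][name] = grade with (name, grade) = s[lo+i]
def altFill (s : List (String × Int)) (lo : Int) : Nat → Nat → List (PySem.Dict String Int) → List (PySem.Dict String Int)
  | 0, _, groups => groups
  | k+1, i, groups =>
    match PySem.List.pyGet? s (lo + (i : Int)) with
    | none => groups                 -- unreachable: here Python would raise IndexError
    | some (nm, gr) => altFill s lo k (i+1) (groups.modify i (fun d => d.insert nm gr))

-- the odd-round loop: groups[i][name] = grade with (name, grade) = s[hi-1-i]
def altFillBack (s : List (String × Int)) (hi : Int) : Nat → Nat → List (PySem.Dict String Int) → List (PySem.Dict String Int)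
  | 0, _, groups => groups
  | k+1, i, groups =>
    match PySem.List.pyGet? s (hi - 1 - (i : Int)) with
    | none => groups                 -- unreachable
    | some (nm, gr) => altFillBack s hi k (i+1) (groups.modify i (fun d => d.insert nm gr))

-- 'for k in range(rounds)' with the two pointers lo, hi; parity of k carried as a Bool; returns (lo, groups)
def altRounds (s : List (String × Int)) (g : Nat) : Nat → Bool → Int → Int → List (PySem.Dict String Int) → Int × List (PySem.Dict String Int)
  | 0, _, lo, _, groups => (lo, groups)
  | r+1, front, lo, hi, groups =>
    if front then altRounds s g r false (lo + g) hi (altFill s lo g 0 groups)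
    else altRounds s g r true lo (hi - g) (altFillBack s hi g 0 groups)

def organize_groups_alt (mapping : List (String × Int)) (group_size : Int) : List (List (String × Int)) :=
  let n : Int := mapping.length
  if group_size > n then [mapping]
  else
    let g := PySem.Int.floordiv n group_size
    let s := PySem.List.sorted mapping (fun u => u.2)
    let rounds := PySem.Int.floordiv n g
    let rem := PySem.Int.mod n g
    let groups : List (PySem.Dict String Int) := List.replicate g.toNat PySem.Dict.empty
    let r := altRounds s g.toNat rounds.toNat true 0 n groups
    (altFill s r.1 rem.toNat 0 r.2).map PySem.Dict.items

-- ===== PRECONDITION & SPEC =====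
-- Pre_ excludes group_size ≤ 0, where Python A raises ZeroDivisionError (group_size = 0)
-- or loops forever (group_size < 0 makes n_groups ≤ 0, so the cycle loop never breaks).
def Pre_organize_groups (mapping : List (String × Int)) (group_size : Int) : Prop := 1 ≤ group_size
instance (mapping : List (String × Int)) (group_size : Int) : Decidable (Pre_organize_groups mapping group_size) := by unfold Pre_organize_groups; infer_instance
def pvWitness_organize_groups : (List (String × Int)) × Int := ([("john", 10), ("paul", 9), ("george", 8), ("ringo", 6)], 2)

def Spec_organize_groups (mapping : List (String × Int)) (group_size : Int) (out : List (List (String × Int))) : Prop := out = organize_groups_alt mapping group_size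
instance (mapping : List (String × Int)) (group_size : Int) (out : List (List (String × Int))) : Decidable (Spec_organize_groups mapping group_size out) := by unfold Spec_organize_groups; infer_instance

-- ===== CLAIM (what is proved, stated in full; the proofs are below) =====
def Claim_equal_organize_groups : Prop := ∀ (mapping : List (String × Int)) (group_size : Int), Dom_organize_groups mapping group_size → Pre_organize_groups mapping group_size → Spec_organize_groups mapping group_size (organize_groups mapping group_size)

-- ===== LEMMAS AND PROOFS =====

-- the contiguous slice s[a : a+m], A's current working list is always such a slice of the sorted list
def seg (s : List (String × Int)) (a m : Nat) : List (String × Int) := (s.drop a).take m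

-- how many of the first r alternating rounds are front rounds
def frontSteps (front : Bool) (r : Nat) : Nat := if front then (r + 1) / 2 else r / 2

theorem seg_cons (s : List (String × Int)) (a m : Nat) (hm : 1 ≤ m) (h : a + m ≤ s.length) :
    seg s a m = s[a]'(by omega) :: seg s (a+1) (m-1) := by
  obtain ⟨m', rfl⟩ : ∃ m', m = m' + 1 := ⟨m - 1, by omega⟩
  unfold seg
  rw [← List.getElem_cons_drop (as := s) (i := a) (by omega), List.take_succ_cons]
  simp

theorem seg_snoc (s : List (String × Int)) (a m : Nat) (hm : 1 ≤ m) (h : a + m ≤ s.length) :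
    seg s a m = seg s a (m-1) ++ [s[a+m-1]'(by omega)] := by
  obtain ⟨m', rfl⟩ : ∃ m', m = m' + 1 := ⟨m - 1, by omega⟩
  unfold seg
  rw [List.take_add_one, List.getElem?_drop, List.getElem?_eq_getElem (by omega)]
  have hx : a + (m' + 1) - 1 = a + m' := by omega
  simp [hx]

theorem length_seg (s : List (String × Int)) (a m : Nat) (h : a + m ≤ s.length) :
    (seg s a m).length = m := by
  unfold seg; simp; omega

theorem inner_front (s : List (String × Int)) :
    ∀ (k a m i : Nat) (groups : List (PySem.Dict String Int)),
    k ≤ m → a + m ≤ s.length →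
    ogInner k 0 (seg s a m) groups i
      = (seg s (a+k) (m-k), altFill s ((a : Int) - i) k i groups) := by
  intro k
  induction k with
  | zero => intro a m i groups _ _; simp [ogInner, altFill]
  | succ k ih =>
    intro a m i groups hk h
    rw [seg_cons s a m (by omega) h]
    simp only [ogInner, PySem.List.pop?_zero_cons]
    rw [ih (a+1) (m-1) (i+1) _ (by omega) (by omega)]
    simp only [altFill]
    have hidx : (a : Int) - i + i = ((a : Nat) : Int) := by omega
    rw [hidx, PySem.List.pyGet?_eq_some_getElem s (by omega) (by exact_mod_cast (by omega : a < s.length))]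
    have htn : (((a : Nat) : Int)).toNat = a := by omega
    simp only [htn]
    congr 2 <;> omega

theorem inner_back (s : List (String × Int)) :
    ∀ (k a m i : Nat) (groups : List (PySem.Dict String Int)),
    k ≤ m → a + m ≤ s.length →
    ogInner k (-1) (seg s a m) groups i
      = (seg s a (m-k), altFillBack s ((a : Int) + m + i) k i groups) := by
  intro k
  induction k with
  | zero => intro a m i groups _ _; simp [ogInner, altFillBack]
  | succ k ih =>
    intro a m i groups hk h
    rw [seg_snoc s a m (by omega) h]
    simp only [ogInner, PySem.List.pop?_last]
    rw [ih a (m-1) (i+1) _ (by omega) (by omega)]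
    simp only [altFillBack]
    have hidx : (a : Int) + m + i - 1 - i = ((a + m - 1 : Nat) : Int) := by omega
    rw [hidx, PySem.List.pyGet?_eq_some_getElem s (by omega) (by exact_mod_cast (by omega : a + m - 1 < s.length))]
    have htn : (((a + m - 1 : Nat) : Int)).toNat = a + m - 1 := by omega
    simp only [htn]
    congr 2
    · omega
    · push_cast; omega

theorem altRounds_lo (s : List (String × Int)) (g : Nat) :
    ∀ (r : Nat) (front : Bool) (lo hi : Int) (groups : List (PySem.Dict String Int)),
    (altRounds s g r front lo hi groups).1 = lo + (frontSteps front r) * g := by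
  intro r
  induction r with
  | zero => intro front lo hi groups; simp [altRounds, frontSteps]
  | succ r ih =>
    intro front lo hi groups
    cases front with
    | true =>
      rw [show altRounds s g (r+1) true lo hi groups
            = altRounds s g r false (lo + g) hi (altFill s lo g 0 groups) from rfl, ih]
      have h1 : frontSteps true (r+1) = frontSteps false r + 1 := by
        simp only [frontSteps]; simp; omega
      rw [h1]; push_cast; ring
    | false =>
      rw [show altRounds s g (r+1) false lo hi groups
            = altRounds s g r true lo (hi - g) (altFillBack s hi g 0 groups) from rfl, ih]
      have h1 : frontSteps false (r+1) = frontSteps true r := by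
        simp [frontSteps]
      rw [h1]

theorem outer_eq (s : List (String × Int)) (g : Nat) (hg : 1 ≤ g) :
    ∀ (r : Nat) (front : Bool) (a m : Nat) (groups : List (PySem.Dict String Int)) (fuel : Nat),
    m / g = r → r < fuel → a + m ≤ s.length →
    ogOuter fuel front (g : Int) (seg s a m) groups
      = (seg s (a + frontSteps front r * g) (m % g),
         (altRounds s g r front (a : Int) ((a : Int) + (m : Int)) groups).2) := by
  intro r
  induction r with
  | zero =>
    intro front a m groups fuel hr hfuel h
    obtain ⟨fuel', rfl⟩ : ∃ f', fuel = f' + 1 := ⟨fuel - 1, by omega⟩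
    have hm : m < g := by
      rcases (Nat.div_eq_zero_iff).mp hr with h' | h'
      · omega
      · exact h'
    have hcond : ((seg s a m).length : Int) < (g : Int) := by
      rw [length_seg s a m h]; exact_mod_cast hm
    rw [show ogOuter (fuel' + 1) front (g : Int) (seg s a m) groups
          = if ((seg s a m).length : Int) < (g : Int) then (seg s a m, groups)
            else (let r := ogInner ((g : Int)).toNat (if front then 0 else -1) (seg s a m) groups 0
                  ogOuter fuel' (!front) (g : Int) r.1 r.2) from rfl,
        if_pos hcond]
    simp only [altRounds, frontSteps]
    have : m % g = m := Nat.mod_eq_of_lt hm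
    cases front <;> simp [this]
  | succ r ih =>
    intro front a m groups fuel hr hfuel h
    obtain ⟨fuel', rfl⟩ : ∃ f', fuel = f' + 1 := ⟨fuel - 1, by omega⟩
    have hgm : g ≤ m := by
      by_contra h'
      rw [Nat.div_eq_of_lt (by omega)] at hr; omega
    have hcond : ¬ ((seg s a m).length : Int) < (g : Int) := by
      rw [length_seg s a m h]
      exact not_lt.mpr (by exact_mod_cast hgm)
    rw [show ogOuter (fuel' + 1) front (g : Int) (seg s a m) groups
          = if ((seg s a m).length : Int) < (g : Int) then (seg s a m, groups)
            else (let r := ogInner ((g : Int)).toNat (if front then 0 else -1) (seg s a m) groups 0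
                  ogOuter fuel' (!front) (g : Int) r.1 r.2) from rfl,
        if_neg hcond]
    simp only [Int.toNat_natCast]
    have hmod : m % g = (m - g) % g := by
      conv_lhs => rw [show m = (m - g) + g by omega]
      rw [Nat.add_mod_right]
    have hdiv : (m - g) / g = r := by
      have := Nat.div_eq_sub_div (by omega : 0 < g) hgm
      omega
    cases front with
    | true =>
      simp only [Bool.not_true, reduceIte]
      rw [inner_front s g a m 0 groups hgm h]
      simp only [Nat.cast_zero, sub_zero]
      rw [ih false (a + g) (m - g) (altFill s (a : Int) g 0 groups) fuel' hdiv (by omega) (by omega)]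
      rw [show altRounds s g (r+1) true (a : Int) ((a : Int) + (m : Int)) groups
            = altRounds s g r false ((a : Int) + g) ((a : Int) + (m : Int)) (altFill s (a : Int) g 0 groups) from rfl]
      have hc1 : ((a + g : Nat) : Int) = (a : Int) + g := by push_cast; ring
      have hc2 : ((a + g : Nat) : Int) + ((m - g : Nat) : Int) = (a : Int) + (m : Int) := by
        push_cast [Nat.cast_sub hgm]; ring
      rw [hc1] at *
      rw [hc2]
      have hfs : a + g + frontSteps false r * g = a + frontSteps true (r+1) * g := by
        have : frontSteps true (r+1) = frontSteps false r + 1 := by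
          simp only [frontSteps]; simp; omega
        rw [this]; ring
      rw [hmod, hfs, hc1]
    | false =>
      simp only [Bool.not_false]
      rw [if_neg (by simp : ¬ (false = true))]
      rw [inner_back s g a m 0 groups hgm h]
      simp only [Nat.cast_zero, add_zero]
      rw [ih true a (m - g) (altFillBack s ((a : Int) + m) g 0 groups) fuel' hdiv (by omega) (by omega)]
      rw [show altRounds s g (r+1) false (a : Int) ((a : Int) + (m : Int)) groups
            = altRounds s g r true (a : Int) ((a : Int) + (m : Int) - g) (altFillBack s ((a : Int) + m) g 0 groups) from rfl]
      have hc2 : (a : Int) + ((m - g : Nat) : Int) = (a : Int) + (m : Int) - g := by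
        push_cast [Nat.cast_sub hgm]; ring
      rw [hc2]
      have hfs : frontSteps false (r+1) = frontSteps true r := by simp [frontSteps]
      rw [hmod, hfs]

theorem tail_eq (s : List (String × Int)) (g : Nat) :
    ∀ (k a i : Nat) (groups : List (PySem.Dict String Int)),
    a + k ≤ s.length → i + k ≤ g →
    ogTail (g : Int) (seg s a k) (i : Int) groups = altFill s ((a : Int) - i) k i groups := by
  intro k
  induction k with
  | zero => intro a i groups _ _; simp [seg, ogTail, altFill]
  | succ k ih =>
    intro a i groups h hik
    rw [seg_cons s a (k+1) (by omega) h]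
    rw [show ogTail (g : Int) (s[a]'(by omega) :: seg s (a+1) (k+1-1)) (i : Int) groups
          = (let j' := if (i : Int) == (g : Int) then 0 else (i : Int)
             ogTail (g : Int) (seg s (a+1) (k+1-1)) (j' + 1)
               (groups.modify j'.toNat (fun d => d.insert (s[a]'(by omega)).1 (s[a]'(by omega)).2))) from rfl]
    have hne : ((i : Int) == (g : Int)) = false := by
      simp only [beq_eq_false_iff_ne, ne_eq, Nat.cast_inj]
      omega
    rw [hne]
    simp only [if_neg Bool.false_ne_true, Int.toNat_natCast]
    have hj : (i : Int) + 1 = ((i + 1 : Nat) : Int) := by push_cast; ring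
    rw [hj, show k + 1 - 1 = k from rfl,
        ih (a+1) (i+1) _ (by omega) (by omega)]
    simp only [altFill]
    have hidx : (a : Int) - i + i = ((a : Nat) : Int) := by omega
    rw [hidx, PySem.List.pyGet?_eq_some_getElem s (by omega) (by exact_mod_cast (by omega : a < s.length))]
    have htn : (((a : Nat) : Int)).toNat = a := by omega
    simp only [htn]
    congr 1
    omega

-- ===== VERDICT (by name: the statement is the Claim_ definition above) =====
theorem organize_groups_spec : Claim_equal_organize_groups := by
  intro mapping group_size _dom hpre
  unfold Spec_organize_groups organize_groups organize_groups_alt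
  by_cases hbig : group_size > (mapping.length : Int)
  · simp [hbig]
  · simp only [if_neg hbig]
    have hpre' : 1 ≤ group_size := hpre
    obtain ⟨gs, rfl⟩ : ∃ gs : Nat, group_size = (gs : Int) := ⟨group_size.toNat, by omega⟩
    have hglen : (gs : Int) ≤ (mapping.length : Int) := not_lt.mp hbig
    have hgsN : gs ≤ mapping.length := by exact_mod_cast hglen
    have hgs1 : 1 ≤ gs := by exact_mod_cast hpre'
    rw [PySem.Int.floordiv_natCast]
    set N := mapping.length with hN
    set g := N / gs with hg
    have hg1 : 1 ≤ g := (Nat.one_le_div_iff (by omega)).mpr hgsN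
    set s := PySem.List.sorted mapping (fun x => x.2) with hs
    have hslen : s.length = N := PySem.List.length_sorted mapping (fun x => x.2) false
    rw [PySem.Int.floordiv_natCast, PySem.Int.mod_natCast]
    simp only [Int.toNat_natCast]
    have hseg : seg s 0 N = s := by
      simp [seg, ← hslen]
    have houter := outer_eq s g hg1 (N / g) true 0 N
      (List.replicate g PySem.Dict.empty) (s.length + 1)
      rfl (by rw [hslen]; have := Nat.div_le_self N g; omega) (by omega)
    simp only [Nat.cast_zero, zero_add] at houter
    rw [hseg] at houter
    rw [houter]
    -- tail application
    have hdm := Nat.div_add_mod N g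
    have hmlt : N % g < g := Nat.mod_lt _ (by omega)
    set r := N / g with hr
    set fs := frontSteps true r with hfs
    have hfsr : fs * g + N % g ≤ N := by
      rcases Nat.eq_zero_or_pos r with h0 | hpos
      · have hfs0 : fs = 0 := by simp [hfs, frontSteps, h0]
        rw [hfs0, Nat.zero_mul, Nat.zero_add]
        exact le_trans (Nat.mod_le _ _) (le_refl _)
      · have h1 : fs ≤ r := by
          have hfse : fs = (r + 1) / 2 := by simp [hfs, frontSteps]
          omega
        calc fs * g + N % g ≤ r * g + N % g := Nat.add_le_add_right (Nat.mul_le_mul_right g h1) _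
          _ = N := by rw [Nat.mul_comm]; exact hdm
    have htail := tail_eq s g (N % g) (fs * g) 0
      ((altRounds s g r true 0 ((N : Int)) (List.replicate g PySem.Dict.empty)).2)
      (by rw [hslen]; exact hfsr) (by omega)
    simp only [Nat.cast_zero, sub_zero] at htail
    rw [htail]
    have hlo := altRounds_lo s g r true 0 ((N : Int))
      (List.replicate g PySem.Dict.empty)
    have hloeq : ((fs * g : Nat) : Int)
        = (altRounds s g r true 0 ((N : Int)) (List.replicate g PySem.Dict.empty)).1 := by
      rw [hlo]; push_cast; ring
    rw [hloeq]
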